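-- pv_equiv track=rewrite | github.com/REVOGOHANSTARK7/CompetitiveProgramming | 07-set_kth_digit-Python/set_kth_digit.py | fun_set_kth_digit
-- ===== SOURCE A (Python) =====
-- def fun_set_kth_digit(n, k, d):
--   if(n>0):
--     m=True
--   else:
--     m=False
--   count=0
--   n=abs(n)
--   a=0
--   b=0
--   while(n>0):
--     s=n%10
--     if(count!=k):
--       b=b+(10**a*s)
--     else:
--       b=b+(10**a*d)
--     n//=10
--     count+=1
--     a+=1
--   if(count==k):
--     b=b+(10**a*d)
--
--   if(m==True):
--     return b
--   else:
--     return (-b)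
-- ===== SOURCE B (Python) =====
-- def fun_set_kth_digit(n, k, d):
--     m = abs(n)
--     nd = len(str(m)) if m else 0
--     if 0 <= k <= nd:
--         p = 10 ** k
--         b = (m // (10 * p)) * (10 * p) + d * p + m % p
--     else:
--         b = m
--     return b if n > 0 else -b
-- ===== Notes on version B (the rewrite author's own statement) =====
-- stated objective: simpler
-- what changed: Replaces A's digit-by-digit rebuild loop with a single closed-form arithmetic replacement of the k-th digit (split m at 10^k and 10^(k+1), insert d), using len(str(m)) for the digit count.
import Mathlib
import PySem

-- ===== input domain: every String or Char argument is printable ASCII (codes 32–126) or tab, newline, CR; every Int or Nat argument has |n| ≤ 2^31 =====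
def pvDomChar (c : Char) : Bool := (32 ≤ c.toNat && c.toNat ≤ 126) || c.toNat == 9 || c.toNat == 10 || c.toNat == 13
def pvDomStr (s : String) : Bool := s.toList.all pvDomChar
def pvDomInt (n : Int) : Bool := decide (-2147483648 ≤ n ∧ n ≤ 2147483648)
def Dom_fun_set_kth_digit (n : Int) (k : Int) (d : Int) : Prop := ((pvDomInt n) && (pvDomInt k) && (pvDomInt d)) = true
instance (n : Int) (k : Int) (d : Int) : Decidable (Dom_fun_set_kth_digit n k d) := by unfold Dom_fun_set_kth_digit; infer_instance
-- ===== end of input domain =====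

-- B replaces A's digit-by-digit rebuild loop with a loop-free closed-form arithmetic
-- replacement of the k-th digit (split |n| at 10^k and 10^(k+1), insert d); objective: simpler.


-- ===== PORT A =====
-- A's while loop over (n, count, a, b); returns the final (count, a, b).
-- 10**a is ported as 10 ^ a.toNat: a starts at 0 and only increments, so a.toNat = a exactly.
def pvLoopA (k : Int) (d : Int) (n : Int) (count : Int) (a : Int) (b : Int) : Int × Int × Int :=
  if 0 < n then
    let s := PySem.Int.mod n 10
    let b' := if count ≠ k then b + 10 ^ a.toNat * s else b + 10 ^ a.toNat * d
    pvLoopA k d (PySem.Int.floordiv n 10) (count + 1) (a + 1) b'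
  else (count, a, b)
termination_by n.toNat
decreasing_by
  rw [PySem.Int.floordiv_eq_ediv_of_pos (by norm_num : (0:Int) < 10)]
  omega

def fun_set_kth_digit (n : Int) (k : Int) (d : Int) : Int :=
  let m : Bool := decide (0 < n)
  let st := pvLoopA k d |n| 0 0 0
  let count := st.1
  let a := st.2.1
  let b := st.2.2
  let b := if count = k then b + 10 ^ a.toNat * d else b
  if m then b else -b

-- ===== PORT B =====
-- closed form: nd = len(str(m)) if m else 0; if 0 <= k <= nd, replace the k-th digit arithmetically.
-- 10 ** k is ported as 10 ^ k.toNat: it is only evaluated under 0 ≤ k.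
def fun_set_kth_digit_alt (n : Int) (k : Int) (d : Int) : Int :=
  let m := |n|
  let nd : Int := if m ≠ 0 then PySem.Str.len (PySem.Int.toStr m) else 0
  let b : Int :=
    if 0 ≤ k ∧ k ≤ nd then
      let p : Int := 10 ^ k.toNat
      PySem.Int.floordiv m (10 * p) * (10 * p) + d * p + PySem.Int.mod m p
    else m
  if 0 < n then b else -b

-- ===== PRECONDITION & SPEC =====
def Spec_fun_set_kth_digit (n : Int) (k : Int) (d : Int) (out : Int) : Prop := out = fun_set_kth_digit_alt n k d
instance (n : Int) (k : Int) (d : Int) (out : Int) : Decidable (Spec_fun_set_kth_digit n k d out) := by unfold Spec_fun_set_kth_digit; infer_instance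

-- ===== CLAIM (what is proved, stated in full; the proofs are below) =====
def Claim_equal_fun_set_kth_digit : Prop := ∀ (n : Int) (k : Int) (d : Int), Dom_fun_set_kth_digit n k d → Spec_fun_set_kth_digit n k d (fun_set_kth_digit n k d)

-- ===== LEMMAS AND PROOFS =====

-- A's value on the absolute value m: the loop plus the post-loop fix-up.
def pvCoreA (k : Int) (d : Int) (m : Int) : Int :=
  let st := pvLoopA k d m 0 0 0
  if st.1 = k then st.2.2 + 10 ^ st.2.1.toNat * d else st.2.2

-- B's digit count of m.
def pvNd (m : Int) : Int := if m ≠ 0 then PySem.Str.len (PySem.Int.toStr m) else 0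

-- B's value on the absolute value m.
def pvCoreB (k : Int) (d : Int) (m : Int) : Int :=
  if 0 ≤ k ∧ k ≤ pvNd m then
    PySem.Int.floordiv m (10 * 10 ^ k.toNat) * (10 * 10 ^ k.toNat)
      + d * 10 ^ k.toNat + PySem.Int.mod m (10 ^ k.toNat)
  else m

theorem pvLoopA_pos (k d n count a b : Int) (hn : 0 < n) :
    pvLoopA k d n count a b =
      pvLoopA k d (PySem.Int.floordiv n 10) (count + 1) (a + 1)
        (if count ≠ k then b + 10 ^ a.toNat * PySem.Int.mod n 10 else b + 10 ^ a.toNat * d) := by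
  rw [pvLoopA, if_pos hn]

theorem pvLoopA_nonpos (k d n count a b : Int) (hn : ¬ 0 < n) :
    pvLoopA k d n count a b = (count, a, b) := by
  rw [pvLoopA, if_neg hn]

theorem pvLoopA_pos0 (k d n : Int) (hn : 0 < n) :
    pvLoopA k d n 0 0 0 =
      pvLoopA k d (PySem.Int.floordiv n 10) 1 1
        (if (0:Int) ≠ k then PySem.Int.mod n 10 else d) := by
  rw [pvLoopA_pos _ _ _ _ _ _ hn]
  norm_num

theorem pvLoopA_nonneg : ∀ (N : Nat) (k d n count a b : Int), n.toNat < N →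
    0 ≤ count → 0 ≤ a →
    0 ≤ (pvLoopA k d n count a b).1 ∧ 0 ≤ (pvLoopA k d n count a b).2.1 := by
  intro N
  induction N with
  | zero => intro k d n count a b h; omega
  | succ N ih =>
    intro k d n count a b hN hc ha
    by_cases hn : 0 < n
    · rw [pvLoopA, if_pos hn]
      refine ih k d _ _ _ _ ?_ (by omega) (by omega)
      rw [PySem.Int.floordiv_eq_ediv_of_pos (by norm_num : (0:Int) < 10)]
      omega
    · rw [pvLoopA, if_neg hn]
      exact ⟨hc, ha⟩

theorem pvLoopA_shift : ∀ (N : Nat) (n k d count a b : Int), n.toNat < N → 0 ≤ a →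
    pvLoopA k d n count a b =
      ((pvLoopA (k - count) d n 0 0 0).1 + count,
       (pvLoopA (k - count) d n 0 0 0).2.1 + a,
       b + 10 ^ a.toNat * (pvLoopA (k - count) d n 0 0 0).2.2) := by
  intro N
  induction N with
  | zero => intro n k d count a b h; omega
  | succ N ih =>
    intro n k d count a b hN ha
    by_cases hn : 0 < n
    · have hlt : (PySem.Int.floordiv n 10).toNat < N := by
        rw [PySem.Int.floordiv_eq_ediv_of_pos (by norm_num : (0:Int) < 10)]
        omega
      rw [pvLoopA_pos _ _ _ _ _ _ hn]
      conv_rhs => rw [pvLoopA_pos0 _ _ _ hn]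
      rw [ih (PySem.Int.floordiv n 10) k d (count + 1) (a + 1) _ hlt (by omega),
          ih (PySem.Int.floordiv n 10) (k - count) d 1 1 _ hlt (by norm_num)]
      have hk : k - (count + 1) = k - count - 1 := by ring
      have hs : (if count ≠ k then b + 10 ^ a.toNat * PySem.Int.mod n 10
                  else b + 10 ^ a.toNat * d)
          = b + 10 ^ a.toNat * (if (0:Int) ≠ k - count then PySem.Int.mod n 10 else d) := by
        by_cases h : count = k
        · rw [if_neg (by omega : ¬ count ≠ k), if_neg (by omega : ¬ (0:Int) ≠ k - count)]
        · rw [if_pos (by omega : count ≠ k), if_pos (by omega : (0:Int) ≠ k - count)]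
      have hpow : (10:Int) ^ (a + 1).toNat = 10 ^ a.toNat * 10 := by
        have : (a + 1).toNat = a.toNat + 1 := by omega
        rw [this, pow_succ]
      rw [hk, hs]
      refine Prod.ext (by simp; omega) (Prod.ext (by simp; omega) ?_)
      simp only [hpow]
      norm_num
      split_ifs <;> ring
    · rw [pvLoopA_nonpos _ _ _ _ _ _ hn]
      conv_rhs => rw [pvLoopA_nonpos _ _ _ _ _ _ hn]
      simp

theorem pvCoreA_step (k d m : Int) (hm : 0 < m) :
    pvCoreA k d m =
      (if k ≠ 0 then PySem.Int.mod m 10 else d) + 10 * pvCoreA (k - 1) d (PySem.Int.floordiv m 10) := by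
  have hf : (PySem.Int.floordiv m 10).toNat < (PySem.Int.floordiv m 10).toNat + 1 := by omega
  unfold pvCoreA
  rw [pvLoopA_pos0 _ _ _ hm]
  rw [pvLoopA_shift ((PySem.Int.floordiv m 10).toNat + 1) (PySem.Int.floordiv m 10) k d 1 1 _ hf
        (by norm_num)]
  set Q := pvLoopA (k - 1) d (PySem.Int.floordiv m 10) 0 0 0 with hQdef
  have hQ := pvLoopA_nonneg ((PySem.Int.floordiv m 10).toNat + 1) (k - 1) d
      (PySem.Int.floordiv m 10) 0 0 0 hf (le_refl 0) (le_refl 0)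
  rw [← hQdef] at hQ
  have hs : (if (0:Int) ≠ k then PySem.Int.mod m 10 else d)
      = (if k ≠ 0 then PySem.Int.mod m 10 else d) := by
    by_cases h : k = 0
    · rw [if_neg (by omega : ¬ (0:Int) ≠ k), if_neg (by omega : ¬ k ≠ 0)]
    · rw [if_pos (by omega : (0:Int) ≠ k), if_pos h]
  have hpow : (10:Int) ^ (Q.2.1 + 1).toNat = 10 ^ Q.2.1.toNat * 10 := by
    have h : (Q.2.1 + 1).toNat = Q.2.1.toNat + 1 := by omega
    rw [h, pow_succ]
  simp only [hs]
  by_cases hqk : Q.1 + 1 = k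
  · rw [if_pos hqk, if_pos (by omega : Q.1 = k - 1), hpow]
    norm_num
    try ring
  · rw [if_neg hqk, if_neg (by omega : ¬ Q.1 = k - 1)]
    norm_num
    try ring

-- len(str(m)) agrees with Mathlib's digit count for positive m
theorem pv_toDigitsCore_len : ∀ (f n : Nat) (l : List Char), 0 < n → n < f →
    (Nat.toDigitsCore 10 f n l).length = (Nat.digits 10 n).length + l.length := by
  intro f
  induction f with
  | zero => intro n l h1 h2; omega
  | succ f ih =>
    intro n l h1 h2
    rw [Nat.toDigitsCore]
    by_cases h10 : n / 10 = 0
    · simp only [h10, reduceIte]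
      rw [Nat.digits_def' (by norm_num : 1 < 10) h1, h10, Nat.digits_zero]
      simp
      omega
    · rw [if_neg h10]
      rw [ih (n / 10) _ (by omega) (by omega)]
      rw [Nat.digits_def' (by norm_num : 1 < 10) h1]
      simp
      omega

theorem pvNd_pos_eq (m : Int) (hm : 0 < m) :
    pvNd m = ((Nat.digits 10 m.toNat).length : Int) := by
  unfold pvNd
  rw [if_pos (by omega)]
  rw [PySem.Str.len_eq, PySem.Int.toList_toStr]
  unfold PySem.Int.toChars
  rw [if_neg (by omega)]
  unfold Nat.toDigits
  rw [pv_toDigitsCore_len (m.toNat + 1) m.toNat [] (by omega) (by omega)]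
  simp

theorem pvNd_zero : pvNd 0 = 0 := by decide

theorem pvNd_nonneg (m : Int) : 0 ≤ pvNd m := by
  unfold pvNd
  split_ifs with h
  · rw [PySem.Str.len_eq]; positivity
  · norm_num

theorem pvNd_step (m : Int) (hm : 0 < m) :
    pvNd m = pvNd (PySem.Int.floordiv m 10) + 1 := by
  have hf : PySem.Int.floordiv m 10 = m / 10 :=
    PySem.Int.floordiv_eq_ediv_of_pos (by norm_num)
  rw [pvNd_pos_eq m hm, Nat.digits_def' (by norm_num : 1 < 10) (by omega : 0 < m.toNat)]
  by_cases h10 : m < 10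
  · have : m / 10 = 0 := by omega
    rw [hf, this, pvNd_zero]
    have : m.toNat / 10 = 0 := by omega
    rw [this, Nat.digits_zero]
    simp
  · have hpos : 0 < m / 10 := by omega
    rw [hf, pvNd_pos_eq _ hpos]
    have : (m / 10).toNat = m.toNat / 10 := by omega
    rw [this]
    simp

theorem pvCoreB_step (k d m : Int) (hm : 0 < m) :
    pvCoreB k d m =
      (if k ≠ 0 then PySem.Int.mod m 10 else d) + 10 * pvCoreB (k - 1) d (PySem.Int.floordiv m 10) := by
  have hf : PySem.Int.floordiv m 10 = m / 10 :=
    PySem.Int.floordiv_eq_ediv_of_pos (by norm_num)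
  have hmod : PySem.Int.mod m 10 = m % 10 :=
    PySem.Int.mod_eq_emod_of_pos (by norm_num)
  rcases lt_trichotomy k 0 with hk | hk | hk
  · -- k < 0: digit is never set on either side
    unfold pvCoreB
    rw [if_neg (show ¬ ((0:Int) ≤ k ∧ k ≤ pvNd m) by omega),
        if_neg (show ¬ ((0:Int) ≤ k - 1 ∧ k - 1 ≤ pvNd (PySem.Int.floordiv m 10)) by omega),
        if_pos (show k ≠ 0 by omega), hf, hmod]
    omega
  · -- k = 0
    subst hk
    unfold pvCoreB
    rw [if_pos (show (0:Int) ≤ 0 ∧ (0:Int) ≤ pvNd m from ⟨le_refl 0, pvNd_nonneg m⟩),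
        if_neg (show ¬ ((0:Int) ≤ 0 - 1 ∧ 0 - 1 ≤ pvNd (PySem.Int.floordiv m 10)) by omega),
        if_neg (show ¬ ((0:Int) ≠ 0) by omega), hf]
    simp only [Int.toNat_zero, pow_zero, mul_one]
    have h2 : PySem.Int.mod m 1 = 0 := by
      rw [PySem.Int.mod_eq_emod_of_pos (by norm_num), Int.emod_one]
    rw [hf, h2]
    omega
  · -- k ≥ 1
    have hcond : (k ≤ pvNd m) ↔ (k - 1 ≤ pvNd (PySem.Int.floordiv m 10)) := by
      rw [pvNd_step m hm]; omega
    by_cases hin : k ≤ pvNd m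
    · unfold pvCoreB
      rw [if_pos (show (0:Int) ≤ k ∧ k ≤ pvNd m from ⟨by omega, hin⟩),
          if_pos (show (0:Int) ≤ k - 1 ∧ k - 1 ≤ pvNd (PySem.Int.floordiv m 10) from
            ⟨by omega, hcond.mp hin⟩),
          if_pos (show k ≠ 0 by omega), hf, hmod]
      set q : Int := 10 ^ (k - 1).toNat with hqdef
      have hq : 0 < q := by positivity
      have hp : (10:Int) ^ k.toNat = 10 * q := by
        rw [hqdef, ← pow_succ']
        congr 1
        omega
      have hfd1 : PySem.Int.floordiv m (10 * 10 ^ k.toNat) = m / 10 / (10 * q) := by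
        rw [PySem.Int.floordiv_eq_ediv_of_pos (by positivity), hp,
            Int.ediv_ediv_of_nonneg (by norm_num : (0:Int) ≤ 10)]
      have hfd2 : PySem.Int.floordiv (m / 10) (10 * q) = m / 10 / (10 * q) :=
        PySem.Int.floordiv_eq_ediv_of_pos (by positivity)
      have hmd1 : PySem.Int.mod m (10 ^ k.toNat) = m % (10 * q) := by
        rw [PySem.Int.mod_eq_emod_of_pos (by positivity), hp]
      have hmd2 : PySem.Int.mod (m / 10) q = (m / 10) % q :=
        PySem.Int.mod_eq_emod_of_pos (by positivity)
      rw [hfd1, hfd2, hmd1, hmd2, hp]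
      have e2 : m % (10 * q) = m - (10 * q) * (m / 10 / q) := by
        rw [Int.emod_def, Int.ediv_ediv_of_nonneg (by norm_num : (0:Int) ≤ 10)]
      have e3 : (m / 10) % q = m / 10 - q * (m / 10 / q) := Int.emod_def _ _
      have e4 : m % 10 = m - 10 * (m / 10) := Int.emod_def _ _
      rw [e2, e3, e4]
      ring
    · unfold pvCoreB
      rw [if_neg (by omega : ¬ ((0:Int) ≤ k ∧ k ≤ pvNd m)),
          if_neg (show ¬ ((0:Int) ≤ k - 1 ∧ k - 1 ≤ pvNd (PySem.Int.floordiv m 10)) by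
            rw [← hcond]; omega),
          if_pos (by omega : k ≠ 0), hf, hmod]
      omega

theorem pv_core_eq : ∀ (N : Nat) (m : Int), m.toNat < N → 0 ≤ m → ∀ (k d : Int),
    pvCoreA k d m = pvCoreB k d m := by
  intro N
  induction N with
  | zero => intro m h; omega
  | succ N ih =>
    intro m hN hm k d
    by_cases hm0 : 0 < m
    · rw [pvCoreA_step k d m hm0, pvCoreB_step k d m hm0]
      have hlt : (PySem.Int.floordiv m 10).toNat < N := by
        rw [PySem.Int.floordiv_eq_ediv_of_pos (by norm_num : (0:Int) < 10)]
        omega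
      have hnn : 0 ≤ PySem.Int.floordiv m 10 := by
        rw [PySem.Int.floordiv_eq_ediv_of_pos (by norm_num : (0:Int) < 10)]
        omega
      rw [ih _ hlt hnn]
    · have hz : m = 0 := by omega
      subst hz
      by_cases hk : k = 0
      · subst hk
        unfold pvCoreA pvCoreB
        rw [pvLoopA_nonpos _ _ _ _ _ _ (by norm_num)]
        rw [if_pos rfl, if_pos (by rw [pvNd_zero]; norm_num)]
        have h1 : PySem.Int.floordiv 0 (10 * 10 ^ (0:Int).toNat) = 0 := by decide
        have h2 : PySem.Int.mod 0 (10 ^ (0:Int).toNat) = 0 := by decide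
        rw [h1, h2]
        norm_num
      · unfold pvCoreA pvCoreB
        rw [pvLoopA_nonpos _ _ _ _ _ _ (by norm_num)]
        rw [if_neg (by omega : ¬ (0:Int) = k)]
        rw [if_neg (show ¬ ((0:Int) ≤ k ∧ k ≤ pvNd 0) by rw [pvNd_zero]; omega)]

-- ===== VERDICT (by name: the statement is the Claim_ definition above) =====
theorem fun_set_kth_digit_spec : Claim_equal_fun_set_kth_digit := by
  intro n k d _
  unfold Spec_fun_set_kth_digit fun_set_kth_digit fun_set_kth_digit_alt
  have h := pv_core_eq (|n|.toNat + 1) |n| (by omega) (abs_nonneg n) k d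
  unfold pvCoreA pvCoreB pvNd at h
  simp only [] at h ⊢
  by_cases hn : 0 < n
  · simp only [hn, decide_true, if_true]
    exact h
  · simp only [hn, decide_false, if_false]
    exact congrArg Neg.neg h
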